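-- pv_equiv track=rewrite | github.com/Daeell/AlGORITM-STUDY | programmers/138476/mjh.py | solution
-- ===== SOURCE A (Python) =====
-- def solution(k, tangerine):
--     answer = 0
--     counts = dict()
--     for e in tangerine:
--         if e not in counts:
--             counts[e] = 1
--         else:
--             counts[e] += 1
--     sorted_counts = sorted(counts.items(), key=lambda x: x[1], reverse=True)
--     i = 0
--     while k > 0:
--         k -= sorted_counts[i][1]
--         answer += 1
--         i += 1
--
--     return answer
-- ===== SOURCE B (Python) =====
-- def solution(k, tangerine):
--     freq = {}
--     for e in tangerine:
--         freq[e] = freq.get(e, 0) + 1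
--     maxf = 0
--     for c in freq.values():
--         if c > maxf:
--             maxf = c
--     buckets = {}
--     for c in freq.values():
--         buckets[c] = buckets.get(c, 0) + 1
--     answer = 0
--     for f in range(maxf, 0, -1):
--         for _ in range(buckets.get(f, 0)):
--             if k <= 0:
--                 return answer
--             k -= f
--             answer += 1
--     return answer
-- ===== Notes on version B (the rewrite author's own statement) =====
-- stated objective: alternative
-- what changed: Replaces the sort of the frequency table by a bucket counter indexed by frequency value, consumed from the maximum frequency downward, so no sorting is needed.
-- outside the precondition, e.g. on solution(5, [1, 1, 2]): A raises IndexError, B returns 2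
import Mathlib
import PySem

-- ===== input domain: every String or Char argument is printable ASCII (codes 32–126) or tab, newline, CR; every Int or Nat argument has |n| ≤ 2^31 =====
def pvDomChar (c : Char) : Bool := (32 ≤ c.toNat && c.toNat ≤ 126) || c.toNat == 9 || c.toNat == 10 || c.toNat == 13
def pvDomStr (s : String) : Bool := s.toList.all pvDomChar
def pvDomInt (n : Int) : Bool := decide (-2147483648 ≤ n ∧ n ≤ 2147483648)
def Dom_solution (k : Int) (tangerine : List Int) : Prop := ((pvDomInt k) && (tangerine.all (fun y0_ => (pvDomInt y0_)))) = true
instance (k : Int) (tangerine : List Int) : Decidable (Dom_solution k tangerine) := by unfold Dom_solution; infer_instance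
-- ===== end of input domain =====

-- B replaces the sort of the frequency table by a bucket counter walked from the maximal
-- frequency downward (objective: alternative algorithm, no sort).

-- ===== PORT A =====
-- while k > 0: k -= sorted_counts[i][1]; answer += 1; i += 1  — walking sorted_counts by index;
-- at [] Python raises IndexError (excluded by Pre_solution), the port returns the accumulator.
def aloop : List (Int × Int) → Int → Int → Int
  | l, k, answer =>
    if k > 0 then
      match l with
      | [] => answer
      | p :: rest => aloop rest (k - p.2) (answer + 1)
    else answer

def solution (k : Int) (tangerine : List Int) : Int :=
  let counts := tangerine.foldl
    (fun d e => if d.contains e = false then d.insert e 1 else d.modify e 0 (· + 1))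
    PySem.Dict.empty
  let sorted_counts := PySem.List.sorted counts.items (fun x => x.2) true
  aloop sorted_counts k 0

-- ===== PORT B =====
-- inner 'for _ in range(n)' with the early 'return answer' (Sum.inl = returned)
def bInner (f : Int) : Nat → Int → Int → Sum Int (Int × Int)
  | 0, k, answer => Sum.inr (k, answer)
  | n + 1, k, answer => if k ≤ 0 then Sum.inl answer else bInner f n (k - f) (answer + 1)

-- 'for f in range(maxf, 0, -1)'
def bloop (buckets : PySem.Dict Int Int) : Nat → Int → Int → Int
  | 0, _, answer => answer
  | f + 1, k, answer =>
    match bInner ((f : Int) + 1) ((buckets.getD ((f : Int) + 1) 0).toNat) k answer with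
    | Sum.inl answer => answer
    | Sum.inr (k, answer) => bloop buckets f k answer

def solution_alt (k : Int) (tangerine : List Int) : Int :=
  let freq := tangerine.foldl (fun d e => d.insert e (d.getD e 0 + 1)) PySem.Dict.empty
  let vals := freq.values
  let maxf := vals.foldl (fun m c => if c > m then c else m) 0
  let buckets := vals.foldl (fun d c => d.insert c (d.getD c 0 + 1)) PySem.Dict.empty
  bloop buckets maxf.toNat k 0

-- ===== PRECONDITION & SPEC =====
-- Pre_ excludes exactly the inputs with k > len(tangerine), on which A raises IndexError
-- (it runs off the end of sorted_counts while k is still positive).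
def Pre_solution (k : Int) (tangerine : List Int) : Prop := k ≤ (tangerine.length : Int)
instance (k : Int) (tangerine : List Int) : Decidable (Pre_solution k tangerine) := by unfold Pre_solution; infer_instance
def pvWitness_solution : Int × List Int := (2, [1, 1, 2])

def Spec_solution (k : Int) (tangerine : List Int) (out : Int) : Prop := out = solution_alt k tangerine
instance (k : Int) (tangerine : List Int) (out : Int) : Decidable (Spec_solution k tangerine out) := by unfold Spec_solution; infer_instance

-- ===== CLAIM (what is proved, stated in full; the proofs are below) =====
def Claim_equal_solution : Prop := ∀ (k : Int) (tangerine : List Int), Dom_solution k tangerine → Pre_solution k tangerine → Spec_solution k tangerine (solution k tangerine)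

-- ===== LEMMAS AND PROOFS =====

-- abstract greedy consumption of a list of counts
def consume : List Int → Int → Int → Int
  | l, k, a =>
    if k > 0 then
      match l with
      | [] => a
      | c :: r => consume r (k - c) (a + 1)
    else a

-- the descending sequence of counts B's bucket walk consumes
def emit (b : PySem.Dict Int Int) : Nat → List Int
  | 0 => []
  | f + 1 => List.replicate ((b.getD ((f : Int) + 1) 0).toNat) ((f : Int) + 1) ++ emit b f

theorem aloop_eq_consume (l : List (Int × Int)) : ∀ k a, aloop l k a = consume (l.map (·.2)) k a := by
  induction l with
  | nil => intro k a; simp [aloop, consume]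
  | cons p r ih => intro k a; simp only [aloop, consume, List.map_cons]; split_ifs <;> simp [ih]

theorem bInner_consume (f : Int) (rest : List Int) :
    ∀ n k a, (match bInner f n k a with
      | Sum.inl a' => a'
      | Sum.inr (k', a') => consume rest k' a') = consume (List.replicate n f ++ rest) k a := by
  intro n
  induction n with
  | zero => intro k a; simp [bInner]
  | succ m ih =>
    intro k a
    simp only [bInner, List.replicate_succ, List.cons_append]
    by_cases h : k ≤ 0
    · simp [h, consume, not_lt.mpr h]
    · simp only [if_neg h]
      rw [ih]
      rw [consume]
      simp [lt_of_not_ge h]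

theorem bloop_eq_consume (b : PySem.Dict Int Int) :
    ∀ f k a, bloop b f k a = consume (emit b f) k a := by
  intro f
  induction f with
  | zero =>
    intro k a
    simp only [bloop, emit, consume]
    split_ifs <;> rfl
  | succ m ih =>
    intro k a
    simp only [bloop, emit]
    rw [← bInner_consume]
    cases bInner ((m : Int) + 1) ((b.getD ((m : Int) + 1) 0).toNat) k a with
    | inl a' => rfl
    | inr p => simp [ih]


theorem countsA_eq (t : List Int) :
    t.foldl (fun d e => if d.contains e = false then d.insert e 1 else d.modify e 0 (· + 1)) PySem.Dict.empty
    = PySem.Dict.counter t := by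
  rw [PySem.Dict.counter_eq_foldl]
  apply PySem.List.foldl_congr_mem
  intro d e _
  by_cases h : d.contains e = false
  · simp only [h, if_true]
    rw [show d.modify e 0 (· + 1) = d.insert e (d.getD e 0 + 1) from rfl,
        PySem.Dict.getD_of_not_contains d 0 h]
    norm_num
  · simp [h]

theorem maxfold_eq (vals : List Int) :
    vals.foldl (fun m c => if c > m then c else m) 0 = vals.foldl max 0 := by
  apply PySem.List.foldl_congr_mem
  intro m c _
  simp [max_def]; omega

theorem emit_count (b : PySem.Dict Int Int) (v : Int) :
    ∀ F : Nat, (emit b F).count v = if 1 ≤ v ∧ v ≤ (F : Int) then (b.getD v 0).toNat else 0 := by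
  intro F
  induction F with
  | zero => simp [emit]; omega
  | succ m ih =>
    simp only [emit, List.count_append, List.count_replicate, beq_iff_eq, ih]
    by_cases hv : v = (m : Int) + 1
    · subst hv
      have h0 : ¬ ((1 : Int) ≤ (m : Int) + 1 ∧ (m : Int) + 1 ≤ (m : Int)) := by omega
      have h1 : (1 : Int) ≤ (m : Int) + 1 ∧ (m : Int) + 1 ≤ ((m + 1 : Nat) : Int) := by push_cast; omega
      simp [h1]
    · rw [if_neg (fun hc => hv hc.symm)]
      have heq : (1 ≤ v ∧ v ≤ (m : Int)) ↔ (1 ≤ v ∧ v ≤ ((m + 1 : Nat) : Int)) := by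
        push_cast; constructor <;> rintro ⟨a, c⟩ <;> exact ⟨a, by omega⟩
      simp [heq]

theorem emit_le (b : PySem.Dict Int Int) : ∀ F : Nat, ∀ x ∈ emit b F, x ≤ (F : Int) := by
  intro F
  induction F with
  | zero => simp [emit]
  | succ m ih =>
    intro x hx
    simp only [emit, List.mem_append, List.mem_replicate] at hx
    rcases hx with ⟨-, rfl⟩ | hx
    · push_cast; omega
    · have := ih x hx; push_cast; omega

theorem emit_pairwise (b : PySem.Dict Int Int) : ∀ F : Nat, (emit b F).Pairwise (fun a c => c ≤ a) := by
  intro F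
  induction F with
  | zero => simp [emit]
  | succ m ih =>
    simp only [emit]
    rw [List.pairwise_append]
    refine ⟨List.pairwise_replicate.mpr (by simp), ih, ?_⟩
    intro x hx y hy
    rw [List.mem_replicate] at hx
    have := emit_le b m y hy
    omega

theorem emit_perm (vals : List Int) (F : Nat)
    (hpos : ∀ v ∈ vals, 1 ≤ v) (hle : ∀ v ∈ vals, v ≤ (F : Int)) :
    (emit (PySem.Dict.counter vals) F).Perm vals := by
  rw [List.perm_iff_count]
  intro v
  rw [emit_count, PySem.Dict.getD_counter]
  by_cases hin : 1 ≤ v ∧ v ≤ (F : Int)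
  · simp [hin]
  · rw [if_neg hin]
    by_cases hm : v ∈ vals
    · exact absurd ⟨hpos v hm, hle v hm⟩ hin
    · simp [List.count_eq_zero_of_not_mem hm]

theorem vals_pos (t : List Int) : ∀ v ∈ (PySem.Dict.counter t).values, 1 ≤ v := by
  intro v hv
  have hval : (PySem.Dict.counter t).values = (PySem.Dict.counter t).items.map (·.2) := rfl
  rw [hval, PySem.Dict.items_counter] at hv
  simp only [List.map_map, List.mem_map] at hv
  obtain ⟨x, hx, rfl⟩ := hv
  have hxt : x ∈ t := (PySem.Set.mem_ofList _ _).mp hx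
  simp only [Function.comp]
  have : 0 < t.count x := List.count_pos_iff.mpr hxt
  omega

theorem desc_eq_of_perm {l1 l2 : List Int} (hp : l1.Perm l2)
    (h1 : l1.Pairwise (fun a b => b ≤ a)) (h2 : l2.Pairwise (fun a b => b ≤ a)) : l1 = l2 := by
  apply List.reverse_injective
  exact PySem.List.eq_of_perm_of_pairwise_le_of_injective (fun x => x) (fun a b h => h)
    ((List.reverse_perm l1).trans (hp.trans (List.reverse_perm l2).symm))
    (List.pairwise_reverse.mpr h1) (List.pairwise_reverse.mpr h2)

theorem main_eq : ∀ (k : Int) (t : List Int), solution k t = solution_alt k t := by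
  intro k t
  simp only [solution, solution_alt, countsA_eq, PySem.Dict.foldl_insert_getD_add_one_eq_counter,
    maxfold_eq, aloop_eq_consume, bloop_eq_consume]
  congr 1
  set vals := (PySem.Dict.counter t).values with hvals
  set maxf := vals.foldl max 0 with hmaxf
  have hmax0 : 0 ≤ maxf := (PySem.List.le_foldl_max vals 0).1
  have hmaxmem : ∀ v ∈ vals, v ≤ maxf := (PySem.List.le_foldl_max vals 0).2
  have hcast : ((maxf.toNat : Nat) : Int) = maxf := Int.toNat_of_nonneg hmax0
  apply desc_eq_of_perm
  · refine ((PySem.List.sorted_perm ((PySem.Dict.counter t).items) (fun x => x.2) true).map (Prod.snd : Int × Int → Int)).trans ?_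
    exact (emit_perm vals maxf.toNat (vals_pos t) (fun v hv => hcast ▸ hmaxmem v hv)).symm
  · exact List.pairwise_map.mpr (PySem.List.sorted_pairwise_rev _ _)
  · exact emit_pairwise _ _

-- ===== VERDICT (by name: the statement is the Claim_ definition above) =====
theorem solution_spec : Claim_equal_solution := by
  intro k t _ _
  unfold Spec_solution
  exact main_eq k t
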